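-- pv_equiv track=rewrite | github.com/tiendm1991/python | leetcode/contest/weekly-214/Contest4.py | createSortedArray_fenwick
-- ===== SOURCE A (Python) =====
-- def createSortedArray_fenwick(instructions) -> int:
--     mod = 10 ** 9 + 7
--     n = max(instructions)
--     a = [0] * (n + 1)
--
--     def get(x):
--         res = 0
--         while x > 0:
--             res += a[x]
--             x -= x & -x
--         return res
--
--     def update(x):
--         while x <= n:
--             a[x] += 1
--             x += x & -x
--
--     ans = 0
--     for i, v in enumerate(instructions):
--         ans += min(get(v - 1), i - get(v))
--         update(v)
--     return ans % mod
-- ===== SOURCE B (Python) =====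
-- def createSortedArray_fenwick(instructions) -> int:
--     # Simpler: direct quadratic counting of strictly-smaller / strictly-greater
--     # earlier elements; no Fenwick tree, no O(max(instructions)) array.
--     mod = 10 ** 9 + 7
--     total = 0
--     for i, v in enumerate(instructions):
--         less = 0
--         greater = 0
--         for w in instructions[:i]:
--             if w < v:
--                 less += 1
--             elif w > v:
--                 greater += 1
--         total += min(less, greater)
--     return total % mod
-- ===== Notes on version B (the rewrite author's own statement) =====
-- stated objective: simpler
-- what changed: Replaces the Fenwick (binary indexed) tree over an O(max value) array with a direct two-counter scan of the already-seen prefix for each element.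
import Mathlib
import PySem

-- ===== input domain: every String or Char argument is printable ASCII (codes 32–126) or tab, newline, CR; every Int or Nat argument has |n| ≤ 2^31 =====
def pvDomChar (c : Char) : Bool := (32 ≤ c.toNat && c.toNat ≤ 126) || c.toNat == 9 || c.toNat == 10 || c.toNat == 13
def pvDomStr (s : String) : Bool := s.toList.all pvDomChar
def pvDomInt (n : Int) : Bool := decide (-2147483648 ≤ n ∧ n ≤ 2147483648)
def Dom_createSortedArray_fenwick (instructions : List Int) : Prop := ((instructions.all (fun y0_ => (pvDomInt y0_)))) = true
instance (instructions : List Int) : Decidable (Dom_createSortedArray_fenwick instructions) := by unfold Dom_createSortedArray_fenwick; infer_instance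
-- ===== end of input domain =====

-- B replaces A's Fenwick (binary indexed) tree over an O(max value) array by a direct
-- two-counter scan of the already-seen prefix for each element (simpler, no big array).

-- ===== PORT A =====

-- Python's `x & -x` (PySem.Int.band is Python's `&`, exact on all ints)
def pvLowbit (x : Int) : Int := PySem.Int.band x (-x)

-- Nat form of the lowbit, used to justify termination of the two while-loops
def lbN (u : Nat) : Nat := u - (u &&& (u - 1))

theorem pvLowbit_natCast (u : Nat) (hu : 0 < u) : pvLowbit (u : Int) = (lbN u : Int) := by
  unfold pvLowbit lbN PySem.Int.band
  have h1 : ¬ (0 ≤ -(u:Int)) := by omega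
  have h2 : (0 : Int) ≤ (u:Int) := by omega
  rw [if_pos h2, if_neg h1]
  have h3 : (-(-(u:Int)) - 1).toNat = u - 1 := by omega
  have h4 : ((u:Int)).toNat = u := by omega
  rw [h3, h4]

theorem pvLowbit_pos (x : Int) (h : 0 < x) : 0 < pvLowbit x ∧ pvLowbit x ≤ x := by
  have h1 : x = ((x.toNat : Nat) : Int) := by omega
  rw [h1, pvLowbit_natCast x.toNat (by omega)]
  have h2 : x.toNat &&& (x.toNat - 1) ≤ x.toNat - 1 := Nat.and_le_right
  unfold lbN
  omega

-- `def get(x)` : while x > 0: res += a[x]; x -= x & -x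
-- (a[x] read via pyGetD: under Pre_ the index is always in range, where pyGetD is exact)
def getLoop (a : List Int) (x res : Int) : Int :=
  if h : 0 < x then getLoop a (x - pvLowbit x) (res + PySem.List.pyGetD a x 0) else res
termination_by x.toNat
decreasing_by
  have := pvLowbit_pos x h; omega

-- `def update(x)` : while x <= n: a[x] += 1; x += x & -x
-- (a[x] += 1 via pySetD/pyGetD, Python's exact setitem/getitem; the `0 < pvLowbit x`
--  test is only a totality guard: it holds whenever Python's loop makes progress, and
--  where it fails (x = 0) Python's loop never terminates — outside Pre_)
def updLoop (n : Int) (a : List Int) (x : Int) : List Int :=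
  if hx : x ≤ n then
    if h : 0 < pvLowbit x then
      updLoop n (PySem.List.pySetD a x (PySem.List.pyGetD a x 0 + 1)) (x + pvLowbit x)
    else a
  else a
termination_by (n + 1 - x).toNat
decreasing_by
  omega

-- body of `for i, v in enumerate(instructions)`
def stepA (n : Int) (st : Int × List Int) (iv : Int × Int) : Int × List Int :=
  (st.1 + min (getLoop st.2 (iv.2 - 1) 0) (iv.1 - getLoop st.2 iv.2 0), updLoop n st.2 iv.2)

def createSortedArray_fenwick (instructions : List Int) : Int :=
  let m : Int := 10 ^ 9 + 7
  match PySem.List.max? instructions (fun x => x) with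
  | none => 0  -- Python: max([]) raises ValueError; excluded by Pre_
  | some n =>
    let a : List Int := List.replicate (n + 1).toNat 0
    let st := (PySem.List.enumerate instructions).foldl (stepA n) (0, a)
    PySem.Int.mod st.1 m

-- ===== PORT B =====

-- body of `for w in instructions[:i]` accumulating (less, greater)
def innerB (v : Int) (lg : Int × Int) (w : Int) : Int × Int :=
  if w < v then (lg.1 + 1, lg.2) else if w > v then (lg.1, lg.2 + 1) else lg

-- body of `for i, v in enumerate(instructions)`
def stepB (xs : List Int) (total : Int) (iv : Int × Int) : Int :=
  let lg := (PySem.List.slice xs none (some iv.1)).foldl (innerB iv.2) (0, 0)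
  total + min lg.1 lg.2

def createSortedArray_fenwick_alt (instructions : List Int) : Int :=
  let m : Int := 10 ^ 9 + 7
  let total := (PySem.List.enumerate instructions).foldl (stepB instructions) 0
  PySem.Int.mod total m

-- ===== PRECONDITION & SPEC =====
-- Pre_ excludes the empty list (A's max([]) raises ValueError) and lists containing a
-- value ≤ 0 (A's `update` while-loop then never terminates, or raises IndexError when
-- the Fenwick array is too short for the negative index); A returns on exactly the
-- admitted inputs.
def Pre_createSortedArray_fenwick (instructions : List Int) : Prop :=
  instructions ≠ [] ∧ ∀ v ∈ instructions, 1 ≤ v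
instance (instructions : List Int) : Decidable (Pre_createSortedArray_fenwick instructions) := by
  unfold Pre_createSortedArray_fenwick; infer_instance

def pvWitness_createSortedArray_fenwick : List Int := [1, 2, 1]

def Spec_createSortedArray_fenwick (instructions : List Int) (out : Int) : Prop := out = createSortedArray_fenwick_alt instructions
instance (instructions : List Int) (out : Int) : Decidable (Spec_createSortedArray_fenwick instructions out) := by unfold Spec_createSortedArray_fenwick; infer_instance

-- ===== CLAIM (what is proved, stated in full; the proofs are below) =====
def Claim_equal_createSortedArray_fenwick : Prop := ∀ (instructions : List Int), Dom_createSortedArray_fenwick instructions → Pre_createSortedArray_fenwick instructions → Spec_createSortedArray_fenwick instructions (createSortedArray_fenwick instructions)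

-- ===== LEMMAS AND PROOFS =====
theorem land_odd (c : Nat) : (2 * c + 1) &&& (2 * c) = 2 * c := by
  apply Nat.eq_of_testBit_eq
  intro i
  cases i with
  | zero => simp [Nat.testBit_zero, Nat.mul_comm]
  | succ j =>
    rw [Nat.testBit_land, Nat.testBit_succ, Nat.testBit_succ]
    have : (2*c+1)/2 = c := by omega
    have h2 : (2*c)/2 = c := by omega
    rw [this, h2, Bool.and_self]

theorem land_even_pred (b : Nat) (hb : 0 < b) :
    (2 * b) &&& (2 * b - 1) = 2 * (b &&& (b - 1)) := by
  apply Nat.eq_of_testBit_eq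
  intro i
  cases i with
  | zero =>
    rw [Nat.testBit_land, Nat.testBit_zero, Nat.testBit_zero]
    simp [Nat.mul_mod_right]
  | succ j =>
    rw [Nat.testBit_land, Nat.testBit_succ, Nat.testBit_succ, Nat.testBit_succ]
    have h1 : (2*b)/2 = b := by omega
    have h2 : (2*b-1)/2 = b - 1 := by omega
    have h3 : (2*(b &&& (b-1)))/2 = b &&& (b-1) := by omega
    rw [h1, h2, h3, Nat.testBit_land]

theorem lbN_odd {u : Nat} (h : u % 2 = 1) : lbN u = 1 := by
  obtain ⟨c, rfl⟩ : ∃ c, u = 2 * c + 1 := ⟨u / 2, by omega⟩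
  unfold lbN
  have : 2 * c + 1 - 1 = 2 * c := by omega
  rw [this, land_odd]
  omega

theorem lbN_two_mul (b : Nat) (hb : 0 < b) : lbN (2 * b) = 2 * lbN b := by
  unfold lbN
  rw [land_even_pred b hb]
  have h5 : b &&& (b-1) ≤ b := Nat.and_le_left
  omega

theorem lbN_pos {u : Nat} (hu : 0 < u) : 0 < lbN u := by
  induction u using Nat.strong_induction_on with
  | _ u ih =>
    rcases Nat.even_or_odd u with ⟨b, hb⟩ | hodd2
    · have hb' : u = 2 * b := by omega
      subst hb'
      rw [lbN_two_mul b (by omega)]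
      have := ih b (by omega) (by omega)
      omega
    · obtain ⟨c, hc⟩ := hodd2
      rw [lbN_odd (by omega)]; omega

theorem lbN_le (u : Nat) : lbN u ≤ u := by
  unfold lbN; omega

theorem lbN_pow {u : Nat} (hu : 0 < u) : ∃ k, lbN u = 2 ^ k := by
  induction u using Nat.strong_induction_on with
  | _ u ih =>
    rcases Nat.even_or_odd u with ⟨b, hb⟩ | hodd2
    · have hb' : u = 2 * b := by omega
      subst hb'
      obtain ⟨k, hk⟩ := ih b (by omega) (by omega)
      exact ⟨k + 1, by rw [lbN_two_mul b (by omega), hk]; ring⟩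
    · obtain ⟨c, hc⟩ := hodd2
      exact ⟨0, by rw [lbN_odd (by omega)]; norm_num⟩

theorem lbN_dvd_sub {u : Nat} (hu : 0 < u) : 2 * lbN u ∣ (u - lbN u) := by
  induction u using Nat.strong_induction_on with
  | _ u ih =>
    rcases Nat.even_or_odd u with ⟨b, hb⟩ | hodd2
    · have hb' : u = 2 * b := by omega
      subst hb'
      rw [lbN_two_mul b (by omega)]
      have hd := ih b (by omega) (by omega)
      have hle := lbN_le b
      obtain ⟨c, hc⟩ := hd
      refine ⟨c, ?_⟩
      have he : 2 * (2 * lbN b) * c = 2 * (2 * lbN b * c) := by ring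
      omega
    · obtain ⟨c, hc⟩ := hodd2
      rw [lbN_odd (by omega)]; omega

theorem lbN_add_self {u : Nat} (hu : 0 < u) : 2 * lbN u ≤ lbN (u + lbN u) := by
  induction u using Nat.strong_induction_on with
  | _ u ih =>
    rcases Nat.even_or_odd u with ⟨b, hb⟩ | hodd2
    · have hb' : u = 2 * b := by omega
      subst hb'
      rw [lbN_two_mul b (by omega)]
      have h1 : 2 * b + 2 * lbN b = 2 * (b + lbN b) := by ring
      rw [h1, lbN_two_mul (b + lbN b) (by omega)]
      have := ih b (by omega) (by omega)
      omega
    · obtain ⟨c0, hc0⟩ := hodd2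
      rw [lbN_odd (by omega)]
      obtain ⟨c, hc⟩ : ∃ c, u + 1 = 2 * c := ⟨(u+1)/2, by omega⟩
      rw [hc, lbN_two_mul c (by omega)]
      have := lbN_pos (u := c) (by omega)
      omega

theorem lbN_add_of_dvd (k : Nat) : ∀ (m r : Nat), 2 ^ k ∣ m → 0 < r → r < 2 ^ k →
    lbN (m + r) = lbN r := by
  induction k with
  | zero => intro m r _ h1 h2; omega
  | succ k ih =>
    intro m r hm hr hrk
    obtain ⟨c, hc⟩ := hm
    have hm2 : ∃ m', m = 2 * m' ∧ 2 ^ k ∣ m' := by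
      refine ⟨2 ^ k * c, ?_, ⟨c, rfl⟩⟩
      rw [hc]; ring
    obtain ⟨m', hm', hdvd⟩ := hm2
    have hpow : (2:Nat) ^ (k+1) = 2 * 2 ^ k := by ring
    rcases Nat.even_or_odd r with ⟨r', hr'⟩ | hodd2
    · have hr'' : r = 2 * r' := by omega
      subst hm' hr''
      have h1 : 2 * m' + 2 * r' = 2 * (m' + r') := by ring
      rw [h1, lbN_two_mul (m' + r') (by omega), lbN_two_mul r' (by omega),
        ih m' r' hdvd (by omega) (by omega)]
    · obtain ⟨c0, hc0⟩ := hodd2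
      subst hm'
      rw [lbN_odd (by omega), lbN_odd (by omega)]

theorem add_lbN_le_pow (k : Nat) : ∀ (r : Nat), r < 2 ^ k → r + lbN r ≤ 2 ^ k := by
  induction k with
  | zero =>
    intro r h
    have : r = 0 := by omega
    subst this
    have : lbN 0 = 0 := by unfold lbN; omega
    omega
  | succ k ih =>
    intro r h
    rcases Nat.eq_zero_or_pos r with h0 | h0
    · subst h0
      have : lbN 0 = 0 := by unfold lbN; omega
      have : (0:Nat) < 2 ^ (k+1) := by positivity
      omega
    rcases Nat.even_or_odd r with ⟨r', hr'⟩ | hodd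
    · have hr'' : r = 2 * r' := by omega
      subst hr''
      rw [lbN_two_mul r' (by omega)]
      have h2 : (2:Nat) ^ (k+1) = 2 * 2 ^ k := by ring
      have := ih r' (by omega)
      omega
    · obtain ⟨c0, hc0⟩ := hodd
      rw [lbN_odd (by omega)]
      have : (2:Nat) ^ (k+1) = 2 * 2 ^ k := by ring
      omega

def chainN (N : Nat) (x : Nat) : List Nat :=
  if h : 0 < x ∧ x ≤ N then x :: chainN N (x + lbN x) else []
termination_by N + 1 - x
decreasing_by
  have := lbN_pos h.1; omega

theorem chainN_mem_ge (N : Nat) : ∀ (x y : Nat), y ∈ chainN N x → x ≤ y := by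
  intro x
  induction hk : N + 1 - x using Nat.strong_induction_on generalizing x with
  | _ k ih =>
    intro y hy
    rw [chainN] at hy
    split_ifs at hy with h
    · rcases List.mem_cons.1 hy with rfl | hy'
      · omega
      · have hlb := lbN_pos h.1
        have := ih (N + 1 - (x + lbN x)) (by omega) (x + lbN x) rfl y hy'
        omega
    · simp at hy

theorem chainN_not_mem (N x y : Nat) (h : ¬ (0 < x ∧ x ≤ N)) : y ∉ chainN N x := by
  rw [chainN]
  split_ifs
  simp

theorem chainN_forward (N v : Nat) (hv : 0 < v) :
    ∀ (x y : Nat), v ≤ x → x - lbN x < v → y ∈ chainN N x → v ≤ y ∧ y - lbN y < v := by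
  intro x
  induction hk : N + 1 - x using Nat.strong_induction_on generalizing x with
  | _ k ih =>
    intro y hvx hxv hy
    rw [chainN] at hy
    split_ifs at hy with h
    · rcases List.mem_cons.1 hy with rfl | hy'
      · exact ⟨hvx, hxv⟩
      · have hlb := lbN_pos h.1
        have h2 := lbN_add_self h.1
        have h3 := lbN_le (x + lbN x)
        have h4 := lbN_le x
        exact ih (N + 1 - (x + lbN x)) (by omega) (x + lbN x) rfl y (by omega) (by omega) hy'
    · simp at hy

theorem chainN_backward (N : Nat) (y : Nat) (hy1 : 1 ≤ y) (hyN : y ≤ N) :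
    ∀ (d v : Nat), d = y - v → 1 ≤ v → v ≤ y → y - lbN y < v → y ∈ chainN N v := by
  intro d
  induction d using Nat.strong_induction_on with
  | _ d ih =>
    intro v hd hv1 hvy hlby
    rcases Nat.eq_or_lt_of_le hvy with rfl | hlt
    · rw [chainN]
      rw [dif_pos ⟨hv1, hyN⟩]
      exact List.mem_cons_self
    · -- v < y
      have hylb := lbN_pos (u := y) (by omega)
      have hylble := lbN_le y
      obtain ⟨k, hk⟩ := lbN_pow (u := y) (by omega)
      have hdvd : 2 * lbN y ∣ (y - lbN y) := lbN_dvd_sub (by omega)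
      set b := lbN y with hb
      set m := y - b with hm
      set r := v - m with hr
      have hr0 : 0 < r := by omega
      have hrb : r < b := by omega
      have hdvd' : 2 ^ k ∣ m := by
        obtain ⟨c, hc⟩ := hdvd
        refine ⟨2 * c, ?_⟩
        rw [← hk]
        have : 2 * b * c = b * (2 * c) := by ring
        omega
      have hlbv : lbN v = lbN r := by
        have : v = m + r := by omega
        rw [this]
        exact lbN_add_of_dvd k m r hdvd' hr0 (by omega)
      have hr' : r + lbN r ≤ 2 ^ k := add_lbN_le_pow k r (by omega)
      have hlbr := lbN_pos (u := r) hr0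
      have hnext : y ∈ chainN N (v + lbN v) := by
        rcases Nat.eq_or_lt_of_le hr' with heq | hlt2
        · -- v + lbN v = y
          have : v + lbN v = y := by omega
          rw [this, chainN, dif_pos ⟨by omega, hyN⟩]
          exact List.mem_cons_self
        · exact ih (y - (v + lbN v)) (by omega) (v + lbN v) rfl (by omega) (by omega) (by omega)
      rw [chainN, dif_pos ⟨hv1, by omega⟩]
      exact List.mem_cons.2 (Or.inr hnext)

theorem chainN_mem_iff (N v y : Nat) (hv1 : 1 ≤ v) (hvN : v ≤ N) (hy1 : 1 ≤ y) (hyN : y ≤ N) :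
    y ∈ chainN N v ↔ (y - lbN y < v ∧ v ≤ y) := by
  constructor
  · intro h
    have hlb := lbN_pos hv1
    have := chainN_forward N v hv1 v y (le_refl v) (by omega) h
    exact ⟨this.2, this.1⟩
  · intro ⟨h1, h2⟩
    exact chainN_backward N y hy1 hyN (y - v) v rfl hv1 h2 h1

theorem countP_split (p : List Int) (A B C : Int → Bool)
    (h : ∀ w, (A w = true ↔ (B w = true ∨ C w = true)) ∧ ¬(B w = true ∧ C w = true)) :
    p.countP A = p.countP B + p.countP C := by
  induction p with
  | nil => simp
  | cons x t ih =>
    rw [List.countP_cons, List.countP_cons, List.countP_cons, ih]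
    have h1 := (h x).1
    have h2 := (h x).2
    by_cases hB : B x = true
    · have hC : ¬ C x = true := fun hc => h2 ⟨hB, hc⟩
      have hA : A x = true := h1.2 (Or.inl hB)
      simp [hA, hB, hC]
      omega
    · by_cases hC : C x = true
      · have hA : A x = true := h1.2 (Or.inr hC)
        simp [hA, hB, hC]
        omega
      · have hA : ¬ A x = true := fun ha => by rcases h1.1 ha with h' | h' <;> contradiction
        simp [hA, hB, hC]

def ivB (x : Nat) (w : Int) : Bool := decide ((x : Int) - (lbN x : Int) < w ∧ w ≤ (x : Int))

def INV (n : Int) (a : List Int) (p : List Int) : Prop :=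
  a.length = (n + 1).toNat ∧
  ∀ x : Nat, 1 ≤ x → (x : Int) ≤ n → PySem.List.pyGetD a (x : Int) 0 = (p.countP (ivB x) : Int)

theorem get_eq (n : Int) (a p : List Int) (hinv : INV n a p) :
    ∀ u : Nat, (u : Int) ≤ n → ∀ res : Int,
      getLoop a (u : Int) res = res + (p.countP (fun w => decide (0 < w ∧ w ≤ (u : Int))) : Int) := by
  intro u
  induction u using Nat.strong_induction_on with
  | _ u ih =>
    intro hun res
    rcases Nat.eq_zero_or_pos u with rfl | hu
    · rw [getLoop, dif_neg (by omega)]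
      have : p.countP (fun w => decide (0 < w ∧ w ≤ ((0:Nat) : Int))) = 0 := by
        apply List.countP_eq_zero.2
        intro w _
        simp only [decide_eq_true_eq]
        omega
      rw [this]; simp
    · have hlb := lbN_pos hu
      have hle := lbN_le u
      rw [getLoop, dif_pos (by exact_mod_cast hu), pvLowbit_natCast u hu]
      have hsub : (u : Int) - (lbN u : Int) = ((u - lbN u : Nat) : Int) := by push_cast [hle]; ring
      rw [hsub, hinv.2 u hu hun, ih (u - lbN u) (by omega) (by omega)]
      have hsplit : p.countP (fun w => decide (0 < w ∧ w ≤ (u : Int)))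
          = p.countP (fun w => decide (0 < w ∧ w ≤ ((u - lbN u : Nat) : Int))) + p.countP (ivB u) := by
        apply countP_split
        refine fun w => ⟨?_, ?_⟩ <;>
          · simp only [ivB, decide_eq_true_eq]
            omega
      rw [hsplit]
      push_cast
      ring_nf

theorem upd_len (n : Int) : ∀ (a : List Int) (x : Int), (updLoop n a x).length = a.length := by
  intro a x
  induction hk : (n + 1 - x).toNat using Nat.strong_induction_on generalizing a x with
  | _ k ih =>
    rw [updLoop]
    split_ifs with hx h
    · rw [ih (n + 1 - (x + pvLowbit x)).toNat (by omega) _ _ rfl, PySem.List.length_pySetD]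
    · rfl
    · rfl

theorem upd_eq (n : Int) (hn : 0 ≤ n) :
    ∀ (k x : Nat) (a : List Int), k = n.toNat + 1 - x → 1 ≤ x → a.length = (n + 1).toNat →
    ∀ y : Nat, 1 ≤ y → (y : Int) ≤ n →
      PySem.List.pyGetD (updLoop n a (x : Int)) (y : Int) 0
        = PySem.List.pyGetD a (y : Int) 0 + (if y ∈ chainN n.toNat x then 1 else 0) := by
  intro k
  induction k using Nat.strong_induction_on with
  | _ k ih =>
    intro x a hk hx1 hlen y hy1 hyn
    have hlb := lbN_pos hx1
    by_cases hx : (x : Int) ≤ n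
    · rw [updLoop, dif_pos hx, dif_pos (by rw [pvLowbit_natCast x hx1]; exact_mod_cast hlb)]
      rw [pvLowbit_natCast x hx1]
      have hcast : (x : Int) + (lbN x : Int) = ((x + lbN x : Nat) : Int) := by push_cast; ring
      rw [hcast]
      have hlen' : (PySem.List.pySetD a (x : Int) (PySem.List.pyGetD a (x : Int) 0 + 1)).length = (n + 1).toNat := by
        rw [PySem.List.length_pySetD]; exact hlen
      rw [ih (n.toNat + 1 - (x + lbN x)) (by omega) (x + lbN x) _ rfl (by omega) hlen' y hy1 hyn]
      have hxr : x < a.length := by omega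
      rw [PySem.List.pyGetD_pySetD_natCast a x y _ 0 hxr]
      have hchain : chainN n.toNat x = x :: chainN n.toNat (x + lbN x) := by
        rw [chainN, dif_pos ⟨hx1, by omega⟩]
      rw [hchain]
      by_cases hyx : y = x
      · subst hyx
        have hnot : y ∉ chainN n.toNat (y + lbN y) := fun hmem => by
          have := chainN_mem_ge n.toNat (y + lbN y) y hmem
          omega
        simp [hnot]
      · simp [hyx, List.mem_cons]
    · rw [updLoop, dif_neg hx]
      have : y ∉ chainN n.toNat x := chainN_not_mem n.toNat x y (by omega)
      simp [this]

theorem upd_inv (n : Int) (a p : List Int) (hinv : INV n a p) (v : Int)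
    (hv1 : 1 ≤ v) (hvn : v ≤ n) : INV n (updLoop n a v) (p ++ [v]) := by
  have hn : 0 ≤ n := by omega
  constructor
  · rw [upd_len]; exact hinv.1
  · intro y hy1 hyn
    have hv : (v.toNat : Int) = v := by omega
    have := upd_eq n hn (n.toNat + 1 - v.toNat) v.toNat a rfl (by omega) hinv.1 y hy1 hyn
    rw [hv] at this
    rw [this, hinv.2 y hy1 hyn, List.countP_append]
    have hiff := chainN_mem_iff n.toNat v.toNat y (by omega) (by omega) (by omega) (by omega)
    have hlby := lbN_pos hy1
    have hley := lbN_le y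
    by_cases hmem : y ∈ chainN n.toNat v.toNat
    · have hival : ivB y v = true := by
        have := hiff.1 hmem
        simp only [ivB, decide_eq_true_eq]
        omega
      simp [hmem, hival]
    · have hival : ¬ ivB y v = true := by
        simp only [ivB, decide_eq_true_eq]
        intro hc
        exact hmem (hiff.2 (by omega))
      simp [hmem, hival]

theorem innerB_foldl (v : Int) :
    ∀ (p : List Int) (l g : Int),
      p.foldl (innerB v) (l, g)
        = (l + (p.countP (fun w => decide (w < v)) : Int), g + (p.countP (fun w => decide (v < w)) : Int)) := by
  intro p
  induction p with
  | nil => simp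
  | cons x t ih =>
    intro l g
    rw [List.foldl_cons, List.countP_cons, List.countP_cons]
    by_cases h1 : x < v
    · rw [show innerB v (l, g) x = (l + 1, g) from by simp [innerB, h1], ih]
      simp [h1]
      exact ⟨by omega, by omega⟩
    · by_cases h2 : v < x
      · rw [show innerB v (l, g) x = (l, g + 1) from by simp [innerB, h1, h2], ih]
        simp [h1, h2]
        omega
      · rw [show innerB v (l, g) x = (l, g) from by simp [innerB, h1, h2], ih]
        simp [h1, h2]

theorem count_lt_of_pos (p : List Int) (v : Int) (hmem : ∀ w ∈ p, 1 ≤ w) :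
    p.countP (fun w => decide (0 < w ∧ w ≤ v - 1)) = p.countP (fun w => decide (w < v)) := by
  apply List.countP_congr
  intro w hw
  have := hmem w hw
  simp only [decide_eq_true_eq]
  omega

theorem count_gt_of_pos (p : List Int) (v : Int) (hmem : ∀ w ∈ p, 1 ≤ w) :
    (p.length : Int) - (p.countP (fun w => decide (0 < w ∧ w ≤ v)) : Int)
      = (p.countP (fun w => decide (v < w)) : Int) := by
  have h1 := List.length_eq_countP_add_countP (l := p) (fun w => decide (0 < w ∧ w ≤ v))
  rw [List.countP_congr (p := fun a => decide ¬(decide (0 < a ∧ a ≤ v) = true))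
    (q := fun w => decide (v < w)) ?_] at h1
  · omega
  · intro w hw
    have := hmem w hw
    simp only [decide_not, Bool.not_eq_true', decide_eq_false_iff_not, decide_eq_true_eq]
    omega

theorem loop_eq (n : Int) (xs : List Int) (hmem : ∀ w ∈ xs, 1 ≤ w ∧ w ≤ n) :
    ∀ (rest pre : List Int), xs = pre ++ rest → ∀ (ans : Int) (a : List Int), INV n a pre →
      ((PySem.List.enumerate rest (pre.length : Int)).foldl (stepA n) (ans, a)).1
        = (PySem.List.enumerate rest (pre.length : Int)).foldl (stepB xs) ans := by
  intro rest
  induction rest with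
  | nil => intro pre _ ans a _; simp [PySem.List.enumerate]
  | cons v rest' ih =>
    intro pre hsplit ans a hinv
    have hpremem : ∀ w ∈ pre, 1 ≤ w ∧ w ≤ n := fun w hw => hmem w (hsplit ▸ List.mem_append_left _ hw)
    have hvmem : 1 ≤ v ∧ v ≤ n := hmem v (hsplit ▸ List.mem_append_right _ (List.mem_cons_self))
    rw [PySem.List.enumerate_cons, List.foldl_cons, List.foldl_cons]
    -- the two new accumulators agree
    have hget1 : getLoop a (v - 1) 0 = (pre.countP (fun w => decide (w < v)) : Int) := by
      have hu : ((v - 1).toNat : Int) = v - 1 := by omega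
      rw [← hu, get_eq n a pre hinv (v - 1).toNat (by omega) 0, hu]
      rw [count_lt_of_pos pre v (fun w hw => (hpremem w hw).1)]
      ring
    have hget2 : getLoop a v 0 = (pre.countP (fun w => decide (0 < w ∧ w ≤ v)) : Int) := by
      have hu : (v.toNat : Int) = v := by omega
      rw [← hu, get_eq n a pre hinv v.toNat (by omega) 0, hu]
      ring
    have hstepB : stepB xs ans ((pre.length : Int), v)
        = ans + min (getLoop a (v - 1) 0) ((pre.length : Int) - getLoop a v 0) := by
      unfold stepB
      rw [PySem.List.slice_to_natCast, hsplit, List.take_left, innerB_foldl v pre 0 0]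
      rw [hget1, hget2, count_gt_of_pos pre v (fun w hw => (hpremem w hw).1)]
      simp
    rw [hstepB]
    have hinv' : INV n (updLoop n a v) (pre ++ [v]) := upd_inv n a pre hinv v hvmem.1 hvmem.2
    have hlen' : ((pre ++ [v]).length : Int) = (pre.length : Int) + 1 := by simp
    have := ih (pre ++ [v]) (by rw [hsplit]; simp) (ans + min (getLoop a (v - 1) 0) ((pre.length : Int) - getLoop a v 0)) (updLoop n a v) hinv'
    rw [hlen'] at this
    exact this

-- ===== VERDICT (by name: the statement is the Claim_ definition above) =====
theorem createSortedArray_fenwick_spec : Claim_equal_createSortedArray_fenwick := by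
  intro xs hdom hpre
  unfold Spec_createSortedArray_fenwick createSortedArray_fenwick createSortedArray_fenwick_alt
  obtain ⟨hne, hpos⟩ := hpre
  cases h : PySem.List.max? xs (fun x => x) with
  | none => exact absurd ((PySem.List.max?_eq_none_iff xs _).1 h) hne
  | some n =>
    have hnmem : n ∈ xs := PySem.List.max?_mem h
    have hn1 : 1 ≤ n := hpos n hnmem
    have hmax : ∀ y ∈ xs, y ≤ n := PySem.List.max?_isMax h
    have hmem : ∀ w ∈ xs, 1 ≤ w ∧ w ≤ n := fun w hw => ⟨hpos w hw, hmax w hw⟩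
    have hinv : INV n (List.replicate (n + 1).toNat 0) [] := by
      constructor
      · simp
      · intro x hx1 hxn
        rw [PySem.List.pyGetD_natCast, List.getD_replicate _ (by omega)]
        simp
    have hloop := loop_eq n xs hmem xs [] rfl 0 (List.replicate (n + 1).toNat 0) hinv
    simp only [List.length_nil, Nat.cast_zero] at hloop
    exact congrArg (fun t => PySem.Int.mod t (10 ^ 9 + 7)) hloop
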